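-- pv_equiv track=rewrite | github.com/allyourcodebase/grpc | generate.py | extractFileLists
-- ===== SOURCE A (Python) =====
-- from collections import defaultdict
--
-- def extractFileLists(reader, desired: set[str]):
--     result = defaultdict(list)
--     inside = None
--     for line in reader:
--         if inside is None and '=' in line:
--             sep = '+=' if '+=' in line else '='
--             assigned, value = map(str.strip, line.split(sep, 1))
--             if assigned in desired:
--                 if value and value[-1] == '\\':
--                     inside = assigned
--                     value = value[:-1].strip()
--                 if value:
--                     result[assigned].append(value)
--         elif inside:
--             value = line.strip()
--             dest = inside
--             if value and value[-1] == '\\':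
--                 value = value[:-1].strip()
--             else:
--                 inside = None
--             if value:
--                 result[dest].append(value)
--     return result
-- ===== SOURCE B (Python) =====
-- def extractFileLists(reader, desired):
--     # Iterator-driven rewrite: assignment lines in the outer loop, continuation
--     # lines consumed by an inner loop; no 'inside' state flag.
--     result = {}
--     it = iter(reader)
--     for line in it:
--         if '=' not in line:
--             continue
--         sep = '+=' if '+=' in line else '='
--         key, value = (s.strip() for s in line.split(sep, 1))
--         if key not in desired:
--             continue
--         cont = bool(value) and value[-1] == '\\'
--         if cont:
--             value = value[:-1].strip()
--         if value:
--             result.setdefault(key, []).append(value)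
--         while cont:
--             line = next(it, None)
--             if line is None:
--                 break
--             value = line.strip()
--             cont = bool(value) and value[-1] == '\\'
--             if cont:
--                 value = value[:-1].strip()
--             if value:
--                 result.setdefault(key, []).append(value)
--     return result
-- ===== Notes on version B (the rewrite author's own statement) =====
-- stated objective: alternative
-- what changed: Replaces A's flat loop with an 'inside' state flag by an explicit-iterator outer loop over assignment lines with an inner while-loop that consumes backslash-continuation lines, so no cross-iteration state variable exists.
-- outside the precondition, e.g. on extractFileLists(['= a \\', 'b=c'], {'', 'b'}): A returns {'': ['a']}, B returns {'': ['a', 'b=c']}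
import Mathlib
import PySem

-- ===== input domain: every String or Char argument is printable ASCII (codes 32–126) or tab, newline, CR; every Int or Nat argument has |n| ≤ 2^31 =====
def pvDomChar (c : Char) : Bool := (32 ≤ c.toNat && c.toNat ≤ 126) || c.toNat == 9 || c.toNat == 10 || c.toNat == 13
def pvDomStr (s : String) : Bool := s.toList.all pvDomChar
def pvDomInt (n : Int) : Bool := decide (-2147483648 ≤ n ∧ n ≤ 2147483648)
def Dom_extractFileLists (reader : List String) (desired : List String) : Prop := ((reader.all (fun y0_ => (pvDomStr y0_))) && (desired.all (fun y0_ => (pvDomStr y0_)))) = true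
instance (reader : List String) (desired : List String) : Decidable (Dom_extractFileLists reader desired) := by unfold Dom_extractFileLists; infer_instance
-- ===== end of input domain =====

-- B replaces A's single loop with an 'inside' state flag by an iterator-style
-- outer loop over assignment lines with an inner loop consuming continuation
-- lines (objective: alternative decomposition; same asymptotic cost).

-- ===== PORT A =====
-- A's loop state: (result dict, inside flag).  One step per line, exactly A's branches.
def pvAStep (desired : List String) (st : PySem.Dict String (List String) × Option String)
    (line : String) : PySem.Dict String (List String) × Option String :=
  let result := st.1
  match st.2 with
  | none =>
    if PySem.Str.isIn "=" line then
      let sep := if PySem.Str.isIn "+=" line then "+=" else "="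
      match ((PySem.Str.splitMax? line sep 1).getD []).map PySem.Str.strip with
      | assigned :: value :: _ =>
        if assigned ∈ desired then
          -- `if value and value[-1] == '\\':`
          let p : Option String × String :=
            if value ≠ "" ∧ PySem.Str.pyGet? value (-1) = some '\\' then
              (some assigned, PySem.Str.strip (PySem.Str.slice value none (some (-1))))
            else (none, value)
          let result := if p.2 ≠ "" then result.insert assigned (result.getD assigned [] ++ [p.2])
                        else result
          (result, p.1)
        else (result, none)
      | _ => (result, none)  -- unreachable: '=' ∈ line, so split yields two parts
    else (result, none)
  | some inside =>
    -- Python `elif inside:` is FALSE for the falsy string "": the line is skipped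
    if inside = "" then (result, some inside)
    else
      let value := PySem.Str.strip line
      let q : String × Option String :=
        if value ≠ "" ∧ PySem.Str.pyGet? value (-1) = some '\\' then
          (PySem.Str.strip (PySem.Str.slice value none (some (-1))), some inside)
        else (value, none)
      let result := if q.1 ≠ "" then result.insert inside (result.getD inside [] ++ [q.1])
                    else result
      (result, q.2)

def extractFileLists (reader : List String) (desired : List String) : List (String × List String) :=
  (reader.foldl (pvAStep desired) ((PySem.Dict.empty : PySem.Dict String (List String)), none)).1.items

-- ===== PORT B =====
-- inner `while cont` loop: consumes continuation lines, returns (remaining lines, result)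
def pvInner (key : String) : List String → PySem.Dict String (List String) →
    List String × PySem.Dict String (List String)
  | [], result => ([], result)
  | line :: rest, result =>
    let value := PySem.Str.strip line
    if value ≠ "" ∧ PySem.Str.pyGet? value (-1) = some '\\' then
      let value := PySem.Str.strip (PySem.Str.slice value none (some (-1)))
      let result := if value ≠ "" then result.insert key (result.getD key [] ++ [value])
                    else result
      pvInner key rest result
    else
      let result := if value ≠ "" then result.insert key (result.getD key [] ++ [value])
                    else result
      (rest, result)

theorem pvInner_len (key : String) (l : List String) (r : PySem.Dict String (List String)) :
    (pvInner key l r).1.length ≤ l.length := by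
  induction l generalizing r with
  | nil => simp [pvInner]
  | cons line rest ih =>
    simp only [pvInner]
    split
    · exact le_trans (ih _) (Nat.le_succ _)
    · exact Nat.le_succ _

-- outer `for line in it` loop
def pvBLoop (desired : List String) : List String → PySem.Dict String (List String) →
    PySem.Dict String (List String)
  | [], result => result
  | line :: rest, result =>
    if PySem.Str.isIn "=" line then
      let sep := if PySem.Str.isIn "+=" line then "+=" else "="
      match ((PySem.Str.splitMax? line sep 1).getD []).map PySem.Str.strip with
      | key :: value :: _ =>
        if key ∈ desired then
          if value ≠ "" ∧ PySem.Str.pyGet? value (-1) = some '\\' then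
            let value := PySem.Str.strip (PySem.Str.slice value none (some (-1)))
            let result := if value ≠ "" then result.insert key (result.getD key [] ++ [value])
                          else result
            let p := pvInner key rest result
            pvBLoop desired p.1 p.2
          else
            let result := if value ≠ "" then result.insert key (result.getD key [] ++ [value])
                          else result
            pvBLoop desired rest result
        else pvBLoop desired rest result
      | _ => pvBLoop desired rest result
    else pvBLoop desired rest result
  termination_by l => l.length
  decreasing_by
    all_goals first
      | exact Nat.lt_succ_of_le (pvInner_len _ _ _)
      | simp

def extractFileLists_alt (reader : List String) (desired : List String) : List (String × List String) :=
  (pvBLoop desired reader (PySem.Dict.empty : PySem.Dict String (List String))).items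

-- ===== PRECONDITION & SPEC =====
-- a line `= value \` that assigns to the EMPTY variable name with a continuation marker
def pvBadLine (line : String) : Bool :=
  PySem.Str.isIn "=" line &&
    (match ((PySem.Str.splitMax? line (if PySem.Str.isIn "+=" line then "+=" else "=") 1).getD
        []).map PySem.Str.strip with
     | key :: value :: _ =>
       (key == "") && (decide (value ≠ "") && decide (PySem.Str.pyGet? value (-1) = some '\\'))
     | _ => false)

-- Pre_ excludes the degenerate inputs where the empty string is a desired variable name AND some
-- line assigns to "" with a backslash continuation: on the empty key A's truthy `elif inside:`
-- test is false, so A silently ignores every remaining line, while B reads them as continuation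
-- lines — a corner no caller of a makefile parser specifies, with no one intended behaviour.
def Pre_extractFileLists (reader : List String) (desired : List String) : Prop :=
  "" ∉ desired ∨ ∀ line ∈ reader, pvBadLine line = false
instance (reader : List String) (desired : List String) : Decidable (Pre_extractFileLists reader desired) := by unfold Pre_extractFileLists; infer_instance

def pvWitness_extractFileLists : List String × List String :=
  (["FILES = a.c \\", "  b.c", "OTHER = x"], ["FILES"])

def Spec_extractFileLists (reader : List String) (desired : List String) (out : List (String × List String)) : Prop := out = extractFileLists_alt reader desired
instance (reader : List String) (desired : List String) (out : List (String × List String)) : Decidable (Spec_extractFileLists reader desired out) := by unfold Spec_extractFileLists; infer_instance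

-- ===== CLAIM (what is proved, stated in full; the proofs are below) =====
def Claim_equal_extractFileLists : Prop := ∀ (reader : List String) (desired : List String), Dom_extractFileLists reader desired → Pre_extractFileLists reader desired → Spec_extractFileLists reader desired (extractFileLists reader desired)

-- ===== LEMMAS AND PROOFS =====

-- Main invariant: with no "" in desired, A's fold from state (r, none) equals B's outer
-- loop, and from state (r, some k) with k ∈ desired equals B's inner loop then outer loop.
theorem pv_main (desired : List String) (l : List String) :
    ∀ r : PySem.Dict String (List String),
      ("" ∉ desired ∨ ∀ li ∈ l, pvBadLine li = false) →
      ((List.foldl (pvAStep desired) (r, none) l).1 = pvBLoop desired l r ∧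
      ∀ k, k ≠ "" →
        (List.foldl (pvAStep desired) (r, some k) l).1 =
          (pvBLoop desired (pvInner k l r).1 (pvInner k l r).2)) := by
  induction l with
  | nil =>
    intro r _
    refine ⟨by simp [pvBLoop], fun k hk => ?_⟩
    simp [pvInner, pvBLoop]
  | cons line rest ih =>
    intro r hd
    have hdrest : "" ∉ desired ∨ ∀ li ∈ rest, pvBadLine li = false := by
      rcases hd with h | h
      · exact Or.inl h
      · exact Or.inr fun li hli => h li (List.mem_cons_of_mem _ hli)
    constructor
    · -- state none
      simp only [List.foldl_cons]
      show (List.foldl (pvAStep desired) (pvAStep desired (r, none) line) rest).1 =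
        pvBLoop desired (line :: rest) r
      rw [pvBLoop.eq_def]
      simp only [pvAStep]
      by_cases h1 : PySem.Str.isIn "=" line = true
      · simp only [h1, if_true]
        cases hps : ((PySem.Str.splitMax? line
            (if PySem.Str.isIn "+=" line = true then "+=" else "=") 1).getD []).map
            PySem.Str.strip with
        | nil => exact (ih r hdrest).1
        | cons key tl =>
          cases tl with
          | nil => exact (ih r hdrest).1
          | cons value tl2 =>
            by_cases h2 : key ∈ desired
            · simp only [if_pos h2]
              by_cases h3 : value ≠ "" ∧ PySem.Str.pyGet? value (-1) = some '\\'
              · simp only [if_pos h3]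
                have hkne : key ≠ "" := by
                  rcases hd with h | h
                  · exact fun he => h (he ▸ h2)
                  · intro he
                    have hb := h line (List.mem_cons_self)
                    rw [pvBadLine, hps] at hb
                    simp [he, h3.1] at hb
                    exact hb (by simpa using h1) (by simpa using h3.2)
                exact (ih _ hdrest).2 key hkne
              · simp only [if_neg h3]
                exact (ih _ hdrest).1
            · simp only [if_neg h2]
              exact (ih r hdrest).1
      · simp only [Bool.not_eq_true] at h1
        simp only [h1, Bool.false_eq_true, if_false]
        exact (ih r hdrest).1
    · -- state some k
      intro k hk
      simp only [List.foldl_cons]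
      show (List.foldl (pvAStep desired) (pvAStep desired (r, some k) line) rest).1 =
        pvBLoop desired (pvInner k (line :: rest) r).1 (pvInner k (line :: rest) r).2
      rw [pvInner]
      simp only [pvAStep, if_neg hk]
      by_cases h3 : PySem.Str.strip line ≠ "" ∧
          PySem.Str.pyGet? (PySem.Str.strip line) (-1) = some '\\'
      · simp only [if_pos h3]
        exact (ih _ hdrest).2 k hk
      · simp only [if_neg h3]
        exact (ih _ hdrest).1

-- ===== VERDICT (by name: the statement is the Claim_ definition above) =====
theorem extractFileLists_spec : Claim_equal_extractFileLists := by
  unfold Claim_equal_extractFileLists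
  intro reader desired _ hpre
  unfold Pre_extractFileLists at hpre
  unfold Spec_extractFileLists extractFileLists extractFileLists_alt
  exact congrArg PySem.Dict.items (pv_main desired reader _ hpre).1
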